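-- pv_equiv track=rewrite | github.com/HazelTheWitch/PyGlitch | pyglitch/glitchabc.py | siXor
-- ===== SOURCE A (Python) =====
-- def siXor(s0, s1):
--     '''Performs s0 ^ s1 where s0 and s1 are lists of sections or intervals'''
--     actSec = [False, False]
--     secs = []
--
--     k0 = [i for s in s0 for i in s]
--     k1 = [i for s in s1 for i in s]
--
--     keyPoints = list(sorted([(k, 0) for k in k0] + [(k, 1)
--                                                     for k in k1], key=lambda x: x[0]))
--
--     X = None
--
--     for k, i in keyPoints:
--         a0 = actSec[0] ^ actSec[1]
--
--         actSec[i] = not actSec[i]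
--
--         a1 = actSec[0] ^ actSec[1]
--
--         if a0 != a1:
--             if a1:
--                 X = k
--             else:
--                 if len(secs) > 0 and secs[-1][1] == X:
--                     secs[-1] = (secs[-1][0], k)
--                 else:
--                     secs.append((X, k))
--
--     secs = [(a, b) for a, b in secs if a != b]
--     return secs
-- ===== SOURCE B (Python) =====
-- def siXor(s0, s1):
--     '''Performs s0 ^ s1 where s0 and s1 are lists of sections or intervals'''
--     pts = sorted(k for s in s0 + s1 for k in s)
--     secs = []
--     it = iter(pts)
--     for a, b in zip(it, it):
--         if secs and secs[-1][1] == a: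
--             secs[-1] = (secs[-1][0], b)
--         else:
--             secs.append((a, b))
--     return [(a, b) for a, b in secs if a != b]
-- ===== Notes on version B (the rewrite author's own statement) =====
-- stated objective: simpler
-- what changed: Replaced A's tagged sweep with a two-boolean XOR state machine by a single sort of all flattened endpoints followed by pairing consecutive endpoints two at a time (each keypoint provably flips the XOR state, so the regions are exactly the parity pairing), keeping the same touching-interval merge and empty-interval filter.
import Mathlib
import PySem

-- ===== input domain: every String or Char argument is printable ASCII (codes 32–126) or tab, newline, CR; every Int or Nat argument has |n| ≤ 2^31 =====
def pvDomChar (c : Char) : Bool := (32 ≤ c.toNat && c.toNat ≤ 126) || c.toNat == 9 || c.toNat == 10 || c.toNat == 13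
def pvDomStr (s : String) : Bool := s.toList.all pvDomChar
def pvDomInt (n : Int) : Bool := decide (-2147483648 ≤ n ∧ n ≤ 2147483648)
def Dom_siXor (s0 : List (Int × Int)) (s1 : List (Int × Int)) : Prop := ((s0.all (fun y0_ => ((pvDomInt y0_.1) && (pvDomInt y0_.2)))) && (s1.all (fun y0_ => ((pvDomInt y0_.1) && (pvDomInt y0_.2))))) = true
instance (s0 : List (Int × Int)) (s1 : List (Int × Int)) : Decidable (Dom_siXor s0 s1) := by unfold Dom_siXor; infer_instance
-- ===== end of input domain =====

-- B replaces A's tagged sweep with boolean state by sorting all endpoints once and pairing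
-- them two at a time (simpler decomposition; same merge of touching intervals, same final filter).

-- ===== PORT A =====
-- one iteration of A's 'for k, i in keyPoints' loop; state = (actSec, secs, X)
def siXorStep (st : (Bool × Bool) × List (Int × Int) × Option Int) (ki : Int × Int) :
    (Bool × Bool) × List (Int × Int) × Option Int :=
  let act := st.1
  let secs := st.2.1
  let X := st.2.2
  let k := ki.1
  let i := ki.2
  let a0 := act.1 ^^ act.2
  let act' := if i = 0 then (!act.1, act.2) else (act.1, !act.2)  -- actSec[i] = not actSec[i]
  let a1 := act'.1 ^^ act'.2
  if a0 ≠ a1 then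
    if a1 then (act', secs, some k)
    else
      -- 'if len(secs) > 0 and secs[-1][1] == X' (comparison against X : Option Int; == None is False)
      match secs.getLast? with
      | some last =>
          if some last.2 = X then (act', secs.dropLast ++ [(last.1, k)], X)
          else (act', secs ++ [(X.getD 0, k)], X)  -- X is provably some at every close; getD is unreachable
      | none => (act', secs ++ [(X.getD 0, k)], X)
  else (act', secs, X)

def siXor (s0 : List (Int × Int)) (s1 : List (Int × Int)) : List (Int × Int) :=
  let k0 := s0.flatMap (fun s => [s.1, s.2])
  let k1 := s1.flatMap (fun s => [s.1, s.2])
  let keyPoints := PySem.List.sorted (k0.map (fun k => (k, (0 : Int))) ++ k1.map (fun k => (k, (1 : Int)))) (fun x => x.1) false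
  let st := keyPoints.foldl siXorStep ((false, false), [], none)
  st.2.1.filter (fun ab => ab.1 != ab.2)

-- ===== PORT B =====
-- 'for a, b in zip(it, it)': consume the sorted endpoints two at a time
def pairUp : List Int → List (Int × Int)
  | a :: b :: rest => (a, b) :: pairUp rest
  | _ => []

-- one iteration of B's loop body: extend the last interval if it touches, else append
def mergeStep (secs : List (Int × Int)) (ab : Int × Int) : List (Int × Int) :=
  match secs.getLast? with
  | some last => if last.2 = ab.1 then secs.dropLast ++ [(last.1, ab.2)] else secs ++ [ab]
  | none => [ab]

def siXor_alt (s0 : List (Int × Int)) (s1 : List (Int × Int)) : List (Int × Int) :=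
  let pts := PySem.List.sorted ((s0 ++ s1).flatMap (fun s => [s.1, s.2])) (fun x => x) false
  let secs := (pairUp pts).foldl mergeStep []
  secs.filter (fun ab => ab.1 != ab.2)

-- ===== PRECONDITION & SPEC =====
def Spec_siXor (s0 : List (Int × Int)) (s1 : List (Int × Int)) (out : List (Int × Int)) : Prop := out = siXor_alt s0 s1
instance (s0 : List (Int × Int)) (s1 : List (Int × Int)) (out : List (Int × Int)) : Decidable (Spec_siXor s0 s1 out) := by unfold Spec_siXor; infer_instance

-- ===== CLAIM (what is proved, stated in full; the proofs are below) =====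
def Claim_equal_siXor : Prop := ∀ (s0 : List (Int × Int)) (s1 : List (Int × Int)), Dom_siXor s0 s1 → Spec_siXor s0 s1 (siXor s0 s1)

-- ===== LEMMAS AND PROOFS =====

-- The values of A's sorted tagged keypoints are B's sorted flat endpoint list.
theorem keys_eq (s0 s1 : List (Int × Int)) :
    (PySem.List.sorted ((s0.flatMap (fun s => [s.1, s.2])).map (fun k => (k, (0 : Int))) ++ (s1.flatMap (fun s => [s.1, s.2])).map (fun k => (k, (1 : Int)))) (fun x => x.1) false).map (fun x => x.1)
      = PySem.List.sorted ((s0 ++ s1).flatMap (fun s => [s.1, s.2])) (fun x => x) false := by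
  apply PySem.List.eq_of_perm_of_pairwise_le_of_injective (fun x => x) (fun _ _ h => h)
  · refine List.Perm.trans ((PySem.List.sorted_perm _ _ _).map _) ?_
    refine List.Perm.trans ?_ (PySem.List.sorted_perm _ _ _).symm
    simp [List.flatMap_append, Function.comp_def]
  · exact PySem.List.sorted_map_key_pairwise _ _
  · exact PySem.List.sorted_pairwise _ _

-- One A-step at even parity: it opens (X := k), leaves secs alone, flips parity to odd.
theorem step_open (a b : Bool) (secs : List (Int × Int)) (X : Option Int) (k i : Int)
    (h : (a ^^ b) = false) :
    (siXorStep ((a, b), secs, X) (k, i)).2 = (secs, some k) ∧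
      ((siXorStep ((a, b), secs, X) (k, i)).1.1 ^^ (siXorStep ((a, b), secs, X) (k, i)).1.2) = true := by
  by_cases hi : i = 0 <;> cases a <;> cases b <;> simp_all [siXorStep]

-- One A-step at odd parity with X = some x: it closes exactly as B's mergeStep, parity back to even.
theorem step_close (a b : Bool) (secs : List (Int × Int)) (x k i : Int)
    (h : (a ^^ b) = true) :
    (siXorStep ((a, b), secs, some x) (k, i)).2.1 = mergeStep secs (x, k) ∧
      ((siXorStep ((a, b), secs, some x) (k, i)).1.1 ^^ (siXorStep ((a, b), secs, some x) (k, i)).1.2) = false := by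
  by_cases hi : i = 0 <;> cases a <;> cases b <;>
    simp_all [siXorStep, mergeStep] <;>
    cases hl : secs.getLast? <;>
    simp_all [List.getLast?_eq_none_iff] <;> split <;> simp

-- A's fold, started at even parity, computes exactly B's pair-and-merge fold
-- (the tags i and the exact actSec pair are irrelevant: each step flips the xor).
theorem fold_eq_pair : ∀ (ks : List (Int × Int)) (secs : List (Int × Int)) (X : Option Int)
    (act : Bool × Bool), (act.1 ^^ act.2) = false →
    (ks.foldl siXorStep (act, secs, X)).2.1 = (pairUp (ks.map (fun x => x.1))).foldl mergeStep secs
  | [], secs, X, act, h => by simp [pairUp]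
  | [(k, i)], secs, X, act, h => by
      obtain ⟨h1, _⟩ := step_open act.1 act.2 secs X k i h
      simp [pairUp, List.foldl_cons]
      exact congrArg (fun p => p.1) h1
  | (k1, i1) :: (k2, i2) :: rest, secs, X, act, h => by
      obtain ⟨h1, hp1⟩ := step_open act.1 act.2 secs X k1 i1 h
      set st1 := siXorStep ((act.1, act.2), secs, X) (k1, i1) with hst1
      have est1 : st1 = (st1.1, secs, some k1) := by
        rw [Prod.ext_iff]; exact ⟨rfl, h1⟩
      obtain ⟨h2, hp2⟩ := step_close st1.1.1 st1.1.2 secs k1 k2 i2 hp1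
      set st2 := siXorStep ((st1.1.1, st1.1.2), secs, some k1) (k2, i2) with hst2
      have key : (rest.foldl siXorStep (st2.1, st2.2.1, st2.2.2)).2.1
          = (pairUp (rest.map (fun x => x.1))).foldl mergeStep st2.2.1 :=
        fold_eq_pair rest st2.2.1 st2.2.2 st2.1 hp2
      simp only [List.map_cons, pairUp, List.foldl_cons]
      rw [← h2]
      calc (rest.foldl siXorStep (siXorStep (siXorStep (act, secs, X) (k1, i1)) (k2, i2))).2.1
          = (rest.foldl siXorStep (st2.1, st2.2.1, st2.2.2)).2.1 := by
            rw [← est1] at hst2; rw [← hst2]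
        _ = (pairUp (rest.map (fun x => x.1))).foldl mergeStep st2.2.1 := key

-- ===== VERDICT (by name: the statement is the Claim_ definition above) =====
theorem siXor_spec : Claim_equal_siXor := by
  intro s0 s1 _
  unfold Spec_siXor
  simp only [siXor, siXor_alt]
  rw [fold_eq_pair _ [] none (false, false) rfl, keys_eq]
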